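-- pv_equiv track=rewrite | github.com/Hackel15/Marquette-Projects | COSC 1002 (PYTHON)/Week_13/Exam2Prep_2.py | asd
-- ===== SOURCE A (Python) =====
-- def asd(number):
--     lista = list(str(number))
--     suma = 0
--     for i in range(len(lista)):
--         if i%2 == 0:
--             suma += int(lista[i])
--         else:
--             suma -= int(lista[i])
--     return suma
-- ===== SOURCE B (Python) =====
-- def asd(number):
--     def go(digs):
--         if not digs:
--             return 0
--         return int(digs[0]) - go(digs[1:])
--     return go(str(number))
-- ===== Notes on version B (the rewrite author's own statement) =====
-- stated objective: alternative
-- what changed: Replaces the indexed loop with a parity branch by a direct recursion on the digit string using the identity altsum(d::rest) = d - altsum(rest), so no index, parity test or running sign is maintained.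
import Mathlib
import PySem

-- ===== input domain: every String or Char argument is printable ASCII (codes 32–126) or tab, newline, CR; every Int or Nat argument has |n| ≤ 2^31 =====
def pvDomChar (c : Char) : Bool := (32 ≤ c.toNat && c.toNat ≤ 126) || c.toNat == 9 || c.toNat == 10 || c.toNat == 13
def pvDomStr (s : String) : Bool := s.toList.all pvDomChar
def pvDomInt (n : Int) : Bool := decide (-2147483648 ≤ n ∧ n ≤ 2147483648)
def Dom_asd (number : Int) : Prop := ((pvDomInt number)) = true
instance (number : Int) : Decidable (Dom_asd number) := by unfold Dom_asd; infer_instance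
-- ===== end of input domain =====

-- B's recursion on the digit string replaces A's indexed loop with parity branch; the return value is the same alternating digit sum.

-- int(<one-character string>) as both Pythons apply it to a digit character (exact under Pre_, where every character is a digit)
def pvDigit (c : Char) : Int := (PySem.Int.ofChars? [c]).getD 0

-- ===== PORT A =====
def asd (number : Int) : Int :=
  let lista := (PySem.Int.toStr number).toList
  (PySem.List.pyRange 0 lista.length 1).foldl
    (fun suma i =>
      if i % 2 == 0 then suma + pvDigit (PySem.List.pyGetD lista i ' ')
      else suma - pvDigit (PySem.List.pyGetD lista i ' ')) 0

-- ===== PORT B =====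
def asdGo (digs : List Char) : Int :=
  match digs with
  | [] => 0
  | c :: rest => pvDigit c - asdGo rest

def asd_alt (number : Int) : Int := asdGo (PySem.Int.toStr number).toList

-- ===== PRECONDITION & SPEC =====
-- Pre_ excludes negative numbers: there str(number) starts with '-' and both A and B raise ValueError at int('-').
def Pre_asd (number : Int) : Prop := 0 ≤ number
instance (number : Int) : Decidable (Pre_asd number) := by unfold Pre_asd; infer_instance
def pvWitness_asd : Int := 12345

def Spec_asd (number : Int) (out : Int) : Prop := out = asd_alt number
instance (number : Int) (out : Int) : Decidable (Spec_asd number out) := by unfold Spec_asd; infer_instance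

-- ===== CLAIM (what is proved, stated in full; the proofs are below) =====
def Claim_equal_asd : Prop := ∀ (number : Int), Dom_asd number → Pre_asd number → Spec_asd number (asd number)

-- ===== LEMMAS AND PROOFS =====

-- A's loop from index k onward adds (resp. subtracts, for odd k) the alternating sum of the remaining suffix.
theorem asd_loop_eq (l : List Char) : ∀ (full : List Char) (k : Nat) (suma : Int),
    full.drop k = l →
    (PySem.List.pyRange (k : Int) full.length 1).foldl
      (fun suma i =>
        if i % 2 == 0 then suma + pvDigit (PySem.List.pyGetD full i ' ')
        else suma - pvDigit (PySem.List.pyGetD full i ' ')) suma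
    = suma + (if k % 2 = 0 then asdGo l else - asdGo l) := by
  induction l with
  | nil =>
    intro full k suma h
    have hlen : full.length ≤ k := by
      by_contra hlt
      have : full.drop k ≠ [] := by
        simp [List.drop_eq_nil_iff]; omega
      exact this h
    rw [PySem.List.pyRange_one_eq_nil (by exact_mod_cast hlen)]
    simp [asdGo]
  | cons c rest ih =>
    intro full k suma h
    have hlt : k < full.length := by
      by_contra hge
      rw [List.drop_eq_nil_iff.mpr (by omega)] at h
      exact (List.cons_ne_nil c rest) h.symm
    have hget : full.getD k ' ' = c := by
      have hk : full[k]? = some c := by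
        have h0 : (List.drop k full)[0]? = some c := by rw [h]; rfl
        have h1 : (List.drop k full)[0]? = full[k + 0]? := List.getElem?_drop
        rw [h1] at h0; simpa using h0
      simp [List.getD, hk]
    rw [PySem.List.pyRange_one_cons (by exact_mod_cast hlt)]
    have hdrop : full.drop (k + 1) = rest := by
      have h1 : List.drop 1 (List.drop k full) = List.drop (k + 1) full := List.drop_drop
      rw [← h1, h]
      rfl
    simp only [List.foldl_cons]
    have hcast : ((k : Int) + 1) = ((k + 1 : Nat) : Int) := by push_cast; ring
    rcases Nat.even_or_odd k with he | ho
    · have hk2 : k % 2 = 0 := Nat.even_iff.mp he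
      have hi2 : ((k : Int) % 2 == 0) = true := by
        simp
        omega
      rw [hi2]
      simp only [if_true]
      rw [PySem.List.pyGetD_natCast, hget, hcast, ih full (k+1) _ hdrop]
      have : (k + 1) % 2 = 1 := by omega
      simp [hk2, this, asdGo]
      ring
    · have hk2 : k % 2 = 1 := Nat.odd_iff.mp ho
      have hi2 : ((k : Int) % 2 == 0) = false := by
        simp
        omega
      rw [hi2]
      simp only [Bool.false_eq_true, if_false]
      rw [PySem.List.pyGetD_natCast, hget, hcast, ih full (k+1) _ hdrop]
      have : (k + 1) % 2 = 0 := by omega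
      simp [hk2, this, asdGo]
      ring

-- ===== VERDICT (by name: the statement is the Claim_ definition above) =====
theorem asd_spec : Claim_equal_asd := by
  intro number _ _
  unfold Spec_asd asd asd_alt
  have h := asd_loop_eq ((PySem.Int.toStr number).toList) ((PySem.Int.toStr number).toList) 0 0 (by simp)
  simpa using h
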